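-- pv_equiv track=rewrite | github.com/jusdhrv/Grid-Multiple-Challenge | main.py | memoized_indices
-- ===== SOURCE A (Python) =====
-- index_memo = {}
--
-- def memoized_indices(n):
--     if n not in index_memo:
--         start_indices = [j * n for j in range(n)]
--         end_indices = [start_index + n for start_index in start_indices]
--         row_indices = [
--             list(range(start, end)) for start, end in zip(start_indices, end_indices)
--         ]
--         col_indices = [[l + m * n for m in range(n)] for l in range(n)]
--         index_memo[n] = (row_indices, col_indices)
--     return index_memo[n]
-- ===== SOURCE B (Python) =====
-- index_memo = {}
--
-- def memoized_indices(n):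
--     if n not in index_memo:
--         rows = []
--         cols = [[] for _ in range(n)]
--         k = 0
--         for _ in range(n):
--             row = []
--             for j in range(n):
--                 row.append(k)
--                 cols[j].append(k)
--                 k += 1
--             rows.append(row)
--         index_memo[n] = (rows, cols)
--     return index_memo[n]
-- ===== Notes on version B (the rewrite author's own statement) =====
-- stated objective: alternative
-- what changed: B replaces A's four staged comprehensions with independent index arithmetic (j*n, start+n, l+m*n) by a single nested imperative pass that walks the grid cells once with a running counter k, appending k to the current row and to cols[j] simultaneously; no per-cell arithmetic formulas remain.
import Mathlib
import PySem

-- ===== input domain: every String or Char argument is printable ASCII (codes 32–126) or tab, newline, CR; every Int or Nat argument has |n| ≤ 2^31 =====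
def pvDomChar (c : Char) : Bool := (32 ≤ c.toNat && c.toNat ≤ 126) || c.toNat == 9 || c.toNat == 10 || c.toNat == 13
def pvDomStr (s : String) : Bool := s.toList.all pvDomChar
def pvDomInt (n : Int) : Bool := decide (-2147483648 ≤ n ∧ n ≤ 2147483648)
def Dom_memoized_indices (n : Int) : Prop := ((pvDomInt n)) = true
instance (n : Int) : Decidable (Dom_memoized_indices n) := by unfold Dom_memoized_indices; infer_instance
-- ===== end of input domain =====

-- B walks the n×n grid cells once with a running counter, filling rows and cols simultaneously,
-- instead of A's four staged comprehensions with per-cell index arithmetic; objective: alternative.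
-- Both Pythons memoize into a module-level dict (an observable side effect); the equivalence proved
-- here is about the return value only, which the memo does not change.

-- ===== PORT A =====
def memoized_indices (n : Int) : List (List Int) × List (List Int) :=
  let start_indices := (PySem.List.pyRange 0 n 1).map (fun j => j * n)
  let end_indices := start_indices.map (fun start_index => start_index + n)
  let row_indices := (start_indices.zip end_indices).map
      (fun p => PySem.List.pyRange p.1 p.2 1)
  let col_indices := (PySem.List.pyRange 0 n 1).map
      (fun l => (PySem.List.pyRange 0 n 1).map (fun m => l + m * n))
  (row_indices, col_indices)

-- ===== PORT B =====
-- cols[j].append(x): replace the j-th list by itself with x appended (j is always in range in B's loop)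
def appendAt : List (List Int) → Nat → Int → List (List Int)
  | [], _, _ => []
  | c :: cs, 0, x => (c ++ [x]) :: cs
  | c :: cs, i+1, x => c :: appendAt cs i x

-- body of B's inner loop: state = (row, cols, k)
def innerStep (p : List Int × List (List Int) × Int) (j : Int) : List Int × List (List Int) × Int :=
  (p.1 ++ [p.2.2], appendAt p.2.1 j.toNat p.2.2, p.2.2 + 1)

-- body of B's outer loop: state = (rows, cols, k)
def outerStep (n : Int) (st : List (List Int) × List (List Int) × Int) (_i : Int) :
    List (List Int) × List (List Int) × Int :=
  let q := (PySem.List.pyRange 0 n 1).foldl innerStep ([], st.2.1, st.2.2)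
  (st.1 ++ [q.1], q.2.1, q.2.2)

def memoized_indices_alt (n : Int) : List (List Int) × List (List Int) :=
  let st := (PySem.List.pyRange 0 n 1).foldl (outerStep n)
      ([], (PySem.List.pyRange 0 n 1).map (fun _ => ([] : List Int)), 0)
  (st.1, st.2.1)

-- ===== PRECONDITION & SPEC =====
def Spec_memoized_indices (n : Int) (out : List (List Int) × List (List Int)) : Prop := out = memoized_indices_alt n
instance (n : Int) (out : List (List Int) × List (List Int)) : Decidable (Spec_memoized_indices n out) := by unfold Spec_memoized_indices; infer_instance

-- ===== CLAIM (what is proved, stated in full; the proofs are below) =====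
def Claim_equal_memoized_indices : Prop := ∀ (n : Int), Dom_memoized_indices n → Spec_memoized_indices n (memoized_indices n)

-- ===== LEMMAS AND PROOFS =====

-- the integer list [0, 1, …, M-1]
def irange (M : Nat) : List Int := (List.range M).map (Nat.cast : Nat → Int)

theorem pyRange_eq_irange (n : Int) : PySem.List.pyRange 0 n 1 = irange n.toNat := by
  rw [PySem.List.pyRange_one]
  unfold irange
  simp only [sub_zero]
  refine List.map_congr_left ?_
  intro k _
  exact zero_add _

theorem appendAt_length (cs : List (List Int)) (i : Nat) (x : Int) :
    (appendAt cs i x).length = cs.length := by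
  induction cs generalizing i with
  | nil => rfl
  | cons c cs ih => cases i with
    | zero => rfl
    | succ i => simpa [appendAt] using ih i

theorem appendAt_getElem? (cs : List (List Int)) (i : Nat) (x : Int) (j : Nat) :
    (appendAt cs i x)[j]? = if j = i then (cs[j]?).map (fun c => c ++ [x]) else cs[j]? := by
  induction cs generalizing i j with
  | nil => simp [appendAt]
  | cons c cs ih =>
    cases i with
    | zero =>
      cases j with
      | zero => simp [appendAt]
      | succ j => simp [appendAt]
    | succ i =>
      cases j with
      | zero => simp [appendAt]
      | succ j => simpa [appendAt] using ih i j

theorem inner_fold_cols_length (js : List Int) (s : List Int × List (List Int) × Int) :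
    ((js.foldl innerStep s).2.1).length = s.2.1.length := by
  induction js generalizing s with
  | nil => rfl
  | cons j js ih => simpa [innerStep, appendAt_length] using ih (innerStep s j)

theorem map_irange_succ (m : Nat) (k : Int) :
    (irange (m + 1)).map (fun t => k + t) = k :: (irange m).map (fun t => k + 1 + t) := by
  unfold irange
  rw [List.range_succ_eq_map]
  simp only [List.map_cons, List.map_map, Nat.cast_zero, add_zero]
  congr 1
  refine List.map_congr_left ?_
  intro t _
  simp only [Function.comp_apply, Nat.succ_eq_add_one]
  push_cast
  ring

theorem inner_fold_row_k (js : List Int) (row : List Int) (cols : List (List Int)) (k : Int) :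
    (js.foldl innerStep (row, cols, k)).1
      = row ++ (irange js.length).map (fun t => k + t) ∧
    (js.foldl innerStep (row, cols, k)).2.2 = k + js.length := by
  induction js generalizing row cols k with
  | nil => simp [irange]
  | cons j js ih =>
    simp only [List.foldl_cons, innerStep]
    obtain ⟨h1, h2⟩ := ih (row ++ [k]) (appendAt cols j.toNat k) (k + 1)
    constructor
    · rw [h1, List.append_assoc, List.length_cons, map_irange_succ]
      simp
    · rw [h2, List.length_cons]
      push_cast
      ring

theorem inner_fold_cols (M : Nat) (cols : List (List Int)) (k : Int) (j : Nat)
    (hj : j < cols.length) :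
    (((irange M).foldl innerStep ([], cols, k)).2.1)[j]? =
      some (if j < M then cols[j] ++ [k + (j : Int)] else cols[j]) := by
  induction M with
  | zero =>
    simp only [irange, List.range_zero, List.map_nil, List.foldl_nil, Nat.not_lt_zero,
      if_false]
    exact List.getElem?_eq_getElem hj
  | succ M ih =>
    have hir : irange (M + 1) = irange M ++ [(M : Int)] := by
      unfold irange; rw [List.range_succ]; simp
    rw [hir, List.foldl_append, List.foldl_cons, List.foldl_nil]
    have hk : ((irange M).foldl innerStep ([], cols, k)).2.2 = k + (M : Int) := by
      have := (inner_fold_row_k (irange M) [] cols k).2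
      simpa [irange] using this
    simp only [innerStep, Int.toNat_natCast]
    rw [appendAt_getElem?, ih, hk]
    by_cases h1 : j = M
    · subst h1
      simp
    · by_cases h2 : j < M
      · simp [h1, h2, Nat.lt_succ_of_lt h2]
      · have h3 : ¬ j < M + 1 := by omega
        simp [h1, h2, h3]

-- the grid tables after I outer iterations (N = n.toNat)
def rowsAfter (N I : Nat) : List (List Int) :=
  (List.range I).map (fun q => (List.range N).map (fun t => ((q * N + t : Nat) : Int)))

def colsAfter (N I : Nat) : List (List Int) :=
  (List.range N).map (fun j => (List.range I).map (fun q => ((q * N + j : Nat) : Int)))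

theorem outer_fold (n : Int) (N : Nat) (hN : n.toNat = N) (I : Nat) :
    (irange I).foldl (outerStep n) ([], List.replicate N ([] : List Int), 0)
      = (rowsAfter N I, colsAfter N I, ((I * N : Nat) : Int)) := by
  induction I with
  | zero =>
    simp only [irange, List.range_zero, List.map_nil, List.foldl_nil, Nat.zero_mul,
      Nat.cast_zero]
    refine Prod.ext ?_ (Prod.ext ?_ rfl)
    · simp [rowsAfter]
    · simp only [colsAfter, List.range_zero, List.map_nil]
      apply List.ext_getElem
      · simp
      · intro j h1 h2
        simp
  | succ I ih =>
    have hir : irange (I + 1) = irange I ++ [(I : Int)] := by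
      unfold irange; rw [List.range_succ]; simp
    rw [hir, List.foldl_append, List.foldl_cons, List.foldl_nil, ih]
    simp only [outerStep, pyRange_eq_irange, hN]
    have hrow := (inner_fold_row_k (irange N) [] (colsAfter N I) ((I * N : Nat) : Int)).1
    have hk := (inner_fold_row_k (irange N) [] (colsAfter N I) ((I * N : Nat) : Int)).2
    have hlenc : (colsAfter N I).length = N := by simp [colsAfter]
    refine Prod.ext ?_ (Prod.ext ?_ ?_)
    · -- rows
      simp only
      rw [hrow]
      unfold rowsAfter
      rw [List.range_succ, List.map_append]
      simp only [List.nil_append, List.map_cons, List.map_nil, irange,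
        List.length_map, List.length_range]
      congr 2
      rw [List.map_map]
      refine List.map_congr_left ?_
      intro t _
      simp only [Function.comp_apply]
      push_cast
      ring
    · -- cols
      simp only
      apply List.ext_getElem?
      intro j
      by_cases hjN : j < N
      · have hjc : j < (colsAfter N I).length := by rw [hlenc]; exact hjN
        rw [inner_fold_cols N (colsAfter N I) _ j hjc]
        simp only [hjN, if_pos]
        have hget : (colsAfter N I)[j] =
            (List.range I).map (fun q => ((q * N + j : Nat) : Int)) := by
          simp [colsAfter]
        rw [hget]
        have hrhs : (colsAfter N (I + 1))[j]? =
            some ((List.range (I + 1)).map (fun q => ((q * N + j : Nat) : Int))) := by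
          simp [colsAfter, hjN]
        rw [hrhs]
        congr 1
        rw [List.range_succ, List.map_append]
        simp only [List.map_cons, List.map_nil]
        congr 2
      · have hL : (((irange N).foldl innerStep
            ([], colsAfter N I, ((I * N : Nat) : Int))).2.1).length = N := by
          rw [inner_fold_cols_length]; exact hlenc
        have hR : (colsAfter N (I + 1)).length = N := by simp [colsAfter]
        rw [List.getElem?_eq_none (by rw [hL]; omega),
            List.getElem?_eq_none (by rw [hR]; omega)]
    · -- k
      simp only
      rw [hk]
      simp only [irange, List.length_map, List.length_range]
      push_cast
      ring

theorem init_cols (n : Int) :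
    (PySem.List.pyRange 0 n 1).map (fun _ => ([] : List Int))
      = List.replicate n.toNat ([] : List Int) := by
  rw [pyRange_eq_irange]
  simp [irange, List.eq_replicate_iff]

-- ===== VERDICT (by name: the statement is the Claim_ definition above) =====
theorem memoized_indices_spec : Claim_equal_memoized_indices := by
  intro n _
  unfold Spec_memoized_indices memoized_indices memoized_indices_alt
  simp only
  rw [init_cols, pyRange_eq_irange, outer_fold n n.toNat rfl n.toNat]
  by_cases hn : n ≤ 0
  · have hN : n.toNat = 0 := by omega
    simp [hN, rowsAfter, colsAfter, irange]
  · rw [not_le] at hn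
    have hNn : ((n.toNat : Nat) : Int) = n := Int.toNat_of_nonneg (le_of_lt hn)
    refine Prod.ext ?_ ?_
    · -- rows
      simp only
      rw [List.map_map, List.zip_map', List.map_map]
      unfold rowsAfter irange
      rw [List.map_map]
      refine List.map_congr_left ?_
      intro q _
      simp only [Function.comp_apply]
      rw [PySem.List.pyRange_one]
      have hend : (q : Int) * n + n - (q : Int) * n = n := by ring
      rw [hend]
      refine List.map_congr_left ?_
      intro t _
      push_cast [hNn]
      ring
    · -- cols
      simp only
      unfold colsAfter irange
      rw [List.map_map]
      refine List.map_congr_left ?_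
      intro j _
      simp only [Function.comp_apply]
      rw [List.map_map]
      refine List.map_congr_left ?_
      intro m _
      simp only [Function.comp_apply]
      push_cast [hNn]
      ring
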